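-- pv_equiv track=rewrite | github.com/jd-develop/sandbox | python/actually_useful/old_stuff/2022_parrainages/main.py | list_departments_from_request
-- ===== SOURCE A (Python) =====
-- def list_departments_from_request(response_: dict):
--     departments_ = {}
--     for parrain in response_:
--         department = parrain['Departement']
--         candidate = parrain['Candidat']
--         try:
--             departments_[department][candidate] += 1
--         except KeyError:
--             try:
--                 departments_[department][candidate] = 1
--             except KeyError:
--                 departments_[department] = {candidate: 1}
--     return departments_
-- ===== SOURCE B (Python) =====
-- def list_departments_from_request(response_: dict):
--     # Pass 1: flat tally keyed by (department, candidate) pairs.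
--     tally = {}
--     for parrain in response_:
--         key = (parrain['Departement'], parrain['Candidat'])
--         tally[key] = tally.get(key, 0) + 1
--     # Pass 2: unfold the flat tally (insertion order) into the nested dict.
--     result = {}
--     for (dept, cand), count in tally.items():
--         result.setdefault(dept, {})[cand] = count
--     return result
-- ===== Notes on version B (the rewrite author's own statement) =====
-- stated objective: idiomatic
-- what changed: Instead of growing the nested dict incrementally with try/except KeyError, B makes one pass accumulating a flat tally keyed by the (department, candidate) pair and a second pass unfolding that tally (in insertion order) into the nested dict via setdefault.
import Mathlib
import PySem

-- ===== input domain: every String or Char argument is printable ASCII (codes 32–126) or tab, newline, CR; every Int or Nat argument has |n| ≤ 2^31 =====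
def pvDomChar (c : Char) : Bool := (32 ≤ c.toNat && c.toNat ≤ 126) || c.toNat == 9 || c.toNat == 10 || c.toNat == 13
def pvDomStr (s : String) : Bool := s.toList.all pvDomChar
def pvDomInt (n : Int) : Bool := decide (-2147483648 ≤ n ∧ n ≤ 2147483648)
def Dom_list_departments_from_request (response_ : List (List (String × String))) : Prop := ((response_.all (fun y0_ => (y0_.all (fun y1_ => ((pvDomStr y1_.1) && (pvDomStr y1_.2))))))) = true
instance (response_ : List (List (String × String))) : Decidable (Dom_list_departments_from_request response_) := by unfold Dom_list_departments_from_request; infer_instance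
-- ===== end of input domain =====

-- B replaces A's incremental nested-dict building (try/except ladder) by a flat tally keyed by
-- the (department, candidate) pair, unfolded into the nested dict in a second pass (idiomatic; same cost).

-- ===== PORT A =====
-- literal transliteration of A: incremental nested dict; the try/except KeyError ladder becomes
-- the match on the outer and inner lookups (KeyError on parrain['...'] is excluded by Pre_).
def list_departments_from_request (response_ : List (List (String × String))) : List (String × List (String × Int)) :=
  let departments_ : PySem.Dict String (PySem.Dict String Int) :=
    response_.foldl (fun d parrain =>
      let department := (PySem.Dict.mk parrain).getD "Departement" ""
      let candidate := (PySem.Dict.mk parrain).getD "Candidat" ""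
      match d.get? department with
      | some inner =>
        match inner.get? candidate with
        | some n => d.insert department (inner.insert candidate (n + 1))
        | none => d.insert department (inner.insert candidate 1)
      | none => d.insert department (PySem.Dict.empty.insert candidate 1)) PySem.Dict.empty
  departments_.items.map (fun q => (q.1, q.2.items))

-- ===== PORT B =====
-- literal transliteration of B: pass 1 builds the flat pair-keyed tally, pass 2 unfolds it.
def list_departments_from_request_alt (response_ : List (List (String × String))) : List (String × List (String × Int)) :=
  let tally : PySem.Dict (String × String) Int :=
    response_.foldl (fun t parrain =>
      let key := ((PySem.Dict.mk parrain).getD "Departement" "", (PySem.Dict.mk parrain).getD "Candidat" "")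
      t.insert key (t.getD key 0 + 1)) PySem.Dict.empty
  let result : PySem.Dict String (PySem.Dict String Int) :=
    tally.items.foldl (fun r kv =>
      -- result.setdefault(dept, {})[cand] = count
      r.insert kv.1.1 ((r.getD kv.1.1 PySem.Dict.empty).insert kv.1.2 kv.2)) PySem.Dict.empty
  result.items.map (fun q => (q.1, q.2.items))

-- ===== PRECONDITION & SPEC =====
-- Pre_ excludes exactly the inputs where A raises KeyError: a record missing the
-- 'Departement' or 'Candidat' key (B raises there too).
def Pre_list_departments_from_request (response_ : List (List (String × String))) : Prop :=
  (response_.all (fun p => (PySem.Dict.mk p).contains "Departement" && (PySem.Dict.mk p).contains "Candidat")) = true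
instance (response_ : List (List (String × String))) : Decidable (Pre_list_departments_from_request response_) := by unfold Pre_list_departments_from_request; infer_instance
def pvWitness_list_departments_from_request : (List (List (String × String))) :=
  [[("Departement", "01"), ("Candidat", "X")], [("Departement", "01"), ("Candidat", "Y")], [("Departement", "01"), ("Candidat", "X")]]

def Spec_list_departments_from_request (response_ : List (List (String × String))) (out : List (String × List (String × Int))) : Prop := out = list_departments_from_request_alt response_
instance (response_ : List (List (String × String))) (out : List (String × List (String × Int))) : Decidable (Spec_list_departments_from_request response_ out) := by unfold Spec_list_departments_from_request; infer_instance

-- ===== CLAIM (what is proved, stated in full; the proofs are below) =====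
def Claim_equal_list_departments_from_request : Prop := ∀ (response_ : List (List (String × String))), Dom_list_departments_from_request response_ → Pre_list_departments_from_request response_ → Spec_list_departments_from_request response_ (list_departments_from_request response_)

-- ===== LEMMAS AND PROOFS =====

-- the (department, candidate) key stream both programs consume
def pvKeyOf (parrain : List (String × String)) : String × String :=
  ((PySem.Dict.mk parrain).getD "Departement" "", (PySem.Dict.mk parrain).getD "Candidat" "")

-- A's accumulator, as a fold over the key stream
def pvA (ks : List (String × String)) : PySem.Dict String (PySem.Dict String Int) :=
  ks.foldl (fun d p => d.modify p.1 PySem.Dict.empty (fun inner => inner.modify p.2 0 (· + 1))) PySem.Dict.empty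

-- B's accumulator, as a fold over the tally items of the key stream
def pvB (ks : List (String × String)) : PySem.Dict String (PySem.Dict String Int) :=
  (PySem.Dict.counter ks).items.foldl (fun r kv =>
    r.insert kv.1.1 ((r.getD kv.1.1 PySem.Dict.empty).insert kv.1.2 kv.2)) PySem.Dict.empty

-- generic: getD after a fold of modifies keyed by .1 = fold of the payloads with matching key
theorem pv_getD_foldl_modify {κ ν β : Type} [BEq κ] [LawfulBEq κ] [DecidableEq κ]
    (step : ν → β → ν) (d0 : ν) :
    ∀ (l : List (κ × β)) (d : PySem.Dict κ ν) (c : κ),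
    (l.foldl (fun d p => d.modify p.1 d0 (fun v => step v p.2)) d).getD c d0
      = ((l.filter (fun p => p.1 == c)).map (·.2)).foldl step (d.getD c d0) := by
  intro l
  induction l with
  | nil => intro d c; simp
  | cons p rest ih =>
    intro d c
    simp only [List.foldl_cons, List.filter_cons]
    by_cases h : p.1 = c
    · subst h
      simp [ih, PySem.Dict.getD_modify_self]
    · have hb : (p.1 == c) = false := by simp [h]
      simp only [hb, Bool.false_eq_true, if_false, ih]
      rw [PySem.Dict.getD_modify_of_ne]
      intro hc; exact h hc.symm

-- dedup commutes with map through ofList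
theorem pv_ofList_map_ofList {α β : Type} [BEq α] [LawfulBEq α] [BEq β] [LawfulBEq β]
    (f : α → β) (xs : List α) :
    PySem.Set.ofList ((PySem.Set.ofList xs).map f) = PySem.Set.ofList (xs.map f) := by
  induction xs using List.reverseRecOn with
  | nil => rfl
  | append_singleton xs x ih =>
    rw [PySem.Set.ofList_append_singleton, List.map_append, List.map_singleton,
        PySem.Set.ofList_append_singleton]
    rw [PySem.Set.add_eq_ite]
    by_cases hx : x ∈ PySem.Set.ofList xs
    · have hfx : f x ∈ PySem.Set.ofList ((xs.map f)) := by
        rw [PySem.Set.mem_ofList]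
        exact List.mem_map_of_mem ((PySem.Set.mem_ofList xs x).mp hx)
      simp only [hx, if_true, ih, PySem.Set.add_of_mem hfx]
    · simp only [hx, if_false]
      rw [List.map_append, List.map_singleton, PySem.Set.ofList_append_singleton, ih]

-- seconds of the dep-filtered dedup list = dedup of the dep-filtered seconds
theorem pv_snd_filter_ofList (ks : List (String × String)) (dep : String) :
    ((PySem.Set.ofList ks).filter (fun p => p.1 == dep)).map (·.2)
      = PySem.Set.ofList ((ks.filter (fun p => p.1 == dep)).map (·.2)) := by
  induction ks using List.reverseRecOn with
  | nil => rfl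
  | append_singleton ks x ih =>
    rw [PySem.Set.ofList_append_singleton, PySem.Set.add_eq_ite, List.filter_append]
    by_cases hd : x.1 = dep
    · have hdb : (x.1 == dep) = true := by simp [hd]
      by_cases hx : x ∈ PySem.Set.ofList ks
      · have hmem : x.2 ∈ (ks.filter (fun p => p.1 == dep)).map (·.2) := by
          refine List.mem_map.mpr ⟨x, ?_, rfl⟩
          exact List.mem_filter.mpr ⟨(PySem.Set.mem_ofList ks x).mp hx, hdb⟩
        have hmem' : x.2 ∈ PySem.Set.ofList ((ks.filter (fun p => p.1 == dep)).map (·.2)) :=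
          (PySem.Set.mem_ofList _ _).mpr hmem
        simp [hx, hdb, PySem.Set.ofList_append_singleton, PySem.Set.add_of_mem hmem', ih]
      · have hnmem : x.2 ∉ PySem.Set.ofList ((ks.filter (fun p => p.1 == dep)).map (·.2)) := by
          intro hc
          rcases List.mem_map.mp ((PySem.Set.mem_ofList _ _).mp hc) with ⟨y, hy, hy2⟩
          rcases List.mem_filter.mp hy with ⟨hyks, hyd⟩
          have : y = x := by
            have : y.1 = dep := by simpa using hyd
            cases x; cases y; simp_all
          exact hx ((PySem.Set.mem_ofList ks x).mpr (this ▸ hyks))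
        simp [hx, hdb, PySem.Set.ofList_append_singleton, PySem.Set.add_of_not_mem hnmem, ih]
    · have hdb : (x.1 == dep) = false := by simp [hd]
      by_cases hx : x ∈ PySem.Set.ofList ks <;>
        simp [hx, hdb, List.filter_append, ih]

theorem pv_count_snd_filter (ks : List (String × String)) (dep c : String) :
    List.count c ((ks.filter (fun p => p.1 == dep)).map (·.2)) = List.count (dep, c) ks := by
  induction ks with
  | nil => rfl
  | cons p rest ih =>
    by_cases hd : p.1 = dep
    · by_cases hc : p.2 = c
      · have : p = (dep, c) := by cases p; simp_all
        subst this
        simp [ih]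
      · have hp : p ≠ (dep, c) := by cases p; simp_all
        simp [hd, hc, hp, ih]
    · have hp : p ≠ (dep, c) := by cases p; simp_all
      simp [hd, hp, ih]

-- A's try/except step is the nested modify
theorem pv_stepA_eq (d : PySem.Dict String (PySem.Dict String Int)) (dep cand : String) :
    (match d.get? dep with
     | some inner =>
       match inner.get? cand with
       | some n => d.insert dep (inner.insert cand (n + 1))
       | none => d.insert dep (inner.insert cand 1)
     | none => d.insert dep (PySem.Dict.empty.insert cand 1))
    = d.modify dep PySem.Dict.empty (fun inner => inner.modify cand 0 (· + 1)) := by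
  simp only [PySem.Dict.modify, PySem.Dict.getD_eq_get?_getD]
  cases h : d.get? dep with
  | none => simp
  | some inner =>
    cases h2 : inner.get? cand with
    | none => simp [h2]
    | some n => simp [h2]

theorem pv_portA_eq (response_ : List (List (String × String))) :
    list_departments_from_request response_
      = (pvA (response_.map pvKeyOf)).items.map (fun q => (q.1, q.2.items)) := by
  unfold list_departments_from_request
  have hf : (fun (d : PySem.Dict String (PySem.Dict String Int)) (parrain : List (String × String)) =>
      let department := (PySem.Dict.mk parrain).getD "Departement" ""
      let candidate := (PySem.Dict.mk parrain).getD "Candidat" ""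
      match d.get? department with
      | some inner =>
        match inner.get? candidate with
        | some n => d.insert department (inner.insert candidate (n + 1))
        | none => d.insert department (inner.insert candidate 1)
      | none => d.insert department (PySem.Dict.empty.insert candidate 1))
      = fun d parrain => d.modify (pvKeyOf parrain).1 PySem.Dict.empty
          (fun inner => inner.modify (pvKeyOf parrain).2 0 (· + 1)) := by
    funext d parrain
    exact pv_stepA_eq d _ _
  rw [hf]
  unfold pvA
  rw [List.foldl_map]

theorem pv_portB_eq (response_ : List (List (String × String))) :
    list_departments_from_request_alt response_
      = (pvB (response_.map pvKeyOf)).items.map (fun q => (q.1, q.2.items)) := by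
  unfold list_departments_from_request_alt pvB
  rw [← PySem.Dict.foldl_insert_getD_add_one_eq_counter, List.foldl_map]
  rfl

theorem pv_keysA (ks : List (String × String)) :
    (pvA ks).keys = PySem.Set.ofList (ks.map (·.1)) := by
  unfold pvA
  have h := PySem.Dict.keys_foldl_modify_key ks Prod.fst
    (PySem.Dict.empty : PySem.Dict String Int)
    (fun (_ : PySem.Dict String (PySem.Dict String Int)) (p : String × String)
        (inner : PySem.Dict String Int) => inner.modify p.2 0 (· + 1)) PySem.Dict.empty
  simpa [PySem.Set.update_nil_left] using h

theorem pv_nodupA (ks : List (String × String)) : (pvA ks).keys.Nodup := by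
  unfold pvA
  exact PySem.Dict.nodup_keys_foldl_modify_key ks Prod.fst _
    (fun (_ : PySem.Dict String (PySem.Dict String Int)) (p : String × String)
        (inner : PySem.Dict String Int) => inner.modify p.2 0 (· + 1)) _
    (by simp [PySem.Dict.keys_empty])

theorem pv_keysB (ks : List (String × String)) :
    (pvB ks).keys = PySem.Set.ofList (ks.map (·.1)) := by
  unfold pvB
  have h := PySem.Dict.keys_foldl_insert_key (PySem.Dict.counter ks).items
    (fun (kv : (String × String) × Int) => kv.1.1)
    (fun r (kv : (String × String) × Int) => (r.getD kv.1.1 PySem.Dict.empty).insert kv.1.2 kv.2)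
    PySem.Dict.empty
  rw [h, PySem.Dict.items_counter, List.map_map]
  have h2 : ((fun (kv : (String × String) × Int) => kv.1.1) ∘
      fun k => (k, (List.count k ks : Int))) = fun (p : String × String) => p.1 := rfl
  rw [h2, PySem.Dict.keys_empty, PySem.Set.update_nil_left]
  exact pv_ofList_map_ofList (·.1) ks

theorem pv_nodupB (ks : List (String × String)) : (pvB ks).keys.Nodup := by
  unfold pvB
  exact PySem.Dict.nodup_keys_foldl_insert_key _ (fun (kv : (String × String) × Int) => kv.1.1) _ _
    (by simp [PySem.Dict.keys_empty])

theorem pv_getDA (ks : List (String × String)) (dep : String) :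
    (pvA ks).getD dep PySem.Dict.empty
      = PySem.Dict.counter ((ks.filter (fun p => p.1 == dep)).map (·.2)) := by
  exact pv_getD_foldl_modify (fun (v : PySem.Dict String Int) (b : String) => v.modify b 0 (· + 1))
    PySem.Dict.empty ks PySem.Dict.empty dep

theorem pv_getDB (ks : List (String × String)) (dep : String) :
    (pvB ks).getD dep PySem.Dict.empty
      = PySem.Dict.counter ((ks.filter (fun p => p.1 == dep)).map (·.2)) := by
  -- re-express pvB as a fold over a (key, payload) list, then apply the generic getD lemma
  have hfold : pvB ks
      = ((PySem.Set.ofList ks).map (fun k => (k.1, (k.2, (List.count k ks : Int))))).foldl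
          (fun r p => r.modify p.1 PySem.Dict.empty (fun v => v.insert p.2.1 p.2.2))
          PySem.Dict.empty := by
    unfold pvB
    rw [PySem.Dict.items_counter, List.foldl_map, List.foldl_map]
    rfl
  rw [hfold]
  refine Eq.trans (pv_getD_foldl_modify
    (fun (v : PySem.Dict String Int) (q : String × Int) => v.insert q.1 q.2)
    PySem.Dict.empty _ PySem.Dict.empty dep) ?_
  rw [List.filter_map, List.map_map]
  have hcomp : ((fun (p : String × String × Int) => p.1 == dep) ∘
      fun (k : String × String) => (k.1, (k.2, (List.count k ks : Int)))) = fun k => k.1 == dep := rfl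
  rw [hcomp]
  rw [PySem.Dict.getD_empty]
  set lst := (PySem.Set.ofList ks).filter (fun k => k.1 == dep) with hlst
  have hmapped : ((fun (x : String × (String × Int)) => x.2) ∘
      fun (k : String × String) => (k.1, (k.2, (List.count k ks : Int))))
      = fun (k : String × String) => (k.2, (List.count k ks : Int)) := rfl
  rw [hmapped, List.foldl_map]
  -- fresh distinct keys: the fold just appends its items
  have hnodup : (lst.map (·.2)).Nodup := by
    rw [hlst, pv_snd_filter_ofList]; exact PySem.Set.nodup_ofList _
  have hitems := PySem.Dict.items_foldl_insert_fresh lst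
    (fun a => a.2) (fun a => (List.count a ks : Int)) PySem.Dict.empty
    (by intro a _; simp [PySem.Dict.contains_empty]) hnodup
  apply PySem.Dict.ext
  rw [hitems, PySem.Dict.items_counter, ← pv_snd_filter_ofList, List.map_map]
  rw [show (PySem.Dict.empty : PySem.Dict String Int).items = [] from rfl]
  rw [List.nil_append]
  refine List.map_congr_left (fun a ha => ?_)
  have hd : a.1 = dep := by
    have := (List.mem_filter.mp ha).2
    simpa using this
  have : List.count a.2 ((ks.filter (fun p => p.1 == dep)).map (·.2)) = List.count a ks := by
    rw [pv_count_snd_filter]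
    congr 1
    cases a; simp_all
  simp [Function.comp_apply, this]

theorem pv_AB (ks : List (String × String)) : pvA ks = pvB ks := by
  apply PySem.Dict.ext
  rw [PySem.Dict.items_eq_map_keys _ (pv_nodupA ks) PySem.Dict.empty,
      PySem.Dict.items_eq_map_keys _ (pv_nodupB ks) PySem.Dict.empty,
      pv_keysA, pv_keysB]
  refine List.map_congr_left (fun dep _ => ?_)
  rw [pv_getDA, pv_getDB]

-- ===== VERDICT (by name: the statement is the Claim_ definition above) =====
theorem list_departments_from_request_spec : Claim_equal_list_departments_from_request := by
  intro response_ _ _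
  unfold Spec_list_departments_from_request
  rw [pv_portA_eq, pv_portB_eq, pv_AB]
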